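-- pv_equiv track=rewrite | github.com/FernandoSinisi/Algoritmos-Programacion-I-1C-2016 | Programas_python/6.6.d palindromo.py | convertir_cadena
-- ===== SOURCE A (Python) =====
-- def convertir_cadena(cadena):
-- 	'''Programa que dice si una cadena es palindromo o no'''
-- 	cad=cadena.lower()
-- 	posi_espa=0
-- 	while (posi_espa!=-1):
-- 		posi_espa=cad.find(' ')
-- 		if (posi_espa==-1):
-- 			return cad
-- 		else:
-- 			cad=cad[:posi_espa]+cad[posi_espa+1:]
-- ===== SOURCE B (Python) =====
-- def convertir_cadena(cadena):
-- 	'''Programa que dice si una cadena es palindromo o no'''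
-- 	return ''.join(ch for ch in cadena.lower() if ch != ' ')
-- ===== Notes on version B (the rewrite author's own statement) =====
-- stated objective: idiomatic
-- what changed: Replaces A's repeated find-a-space-and-splice string reconstruction loop with a single left-to-right pass that joins the non-space characters of the lowercased string.
import Mathlib
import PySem

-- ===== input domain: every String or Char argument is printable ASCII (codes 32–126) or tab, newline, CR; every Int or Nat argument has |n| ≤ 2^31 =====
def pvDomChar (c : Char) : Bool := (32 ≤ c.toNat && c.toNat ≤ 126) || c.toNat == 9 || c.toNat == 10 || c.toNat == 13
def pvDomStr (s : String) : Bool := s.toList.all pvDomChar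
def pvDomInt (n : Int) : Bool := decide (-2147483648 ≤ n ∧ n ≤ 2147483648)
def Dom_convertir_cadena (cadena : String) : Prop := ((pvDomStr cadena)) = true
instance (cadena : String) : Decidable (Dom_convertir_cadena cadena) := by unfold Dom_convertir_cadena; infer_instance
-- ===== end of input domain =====

-- B replaces A's repeated find(' ')-and-slice reconstruction with one linear filtering pass over the lowercased string (objective: idiomatic).

-- ===== PORT A =====
-- A's while loop: repeatedly find the first ' ' and splice it out (cad[:i] + cad[i+1:]),
-- returning when find gives -1; ported on the code-point list (exact via the toList bridge lemmas).
def convLoopA (cad : List Char) : List Char :=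
  let posi := PySem.Chars.find cad [' ']
  if posi = -1 then cad
  else
    convLoopA (PySem.List.slice cad none (some posi) ++ PySem.List.slice cad (some (posi + 1)) none)
termination_by cad.length
decreasing_by
  have hnn : 0 ≤ PySem.Chars.find cad [' '] := by
    have := PySem.Chars.neg_one_le_find cad [' ']
    omega
  have hspec := PySem.Chars.find_spec hnn
  have hlt : (PySem.Chars.find cad [' ']).toNat < cad.length := by
    have hp := hspec.1
    by_contra hge
    push Not at hge
    rw [List.drop_eq_nil_of_le hge] at hp
    simp at hp
  rw [PySem.List.slice_to, PySem.List.slice_from]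
  · have h1 : (PySem.Chars.find cad [' '] + 1).toNat = (PySem.Chars.find cad [' ']).toNat + 1 := by
      omega
    simp [h1]
    omega
  · omega
  · omega

def convertir_cadena (cadena : String) : String :=
  String.ofList (convLoopA (PySem.Str.lower cadena).toList)

-- ===== PORT B =====
-- ''.join(ch for ch in cadena.lower() if ch != ' ')
def convertir_cadena_alt (cadena : String) : String :=
  String.ofList ((PySem.Str.lower cadena).toList.filter (fun ch => ch != ' '))

-- ===== PRECONDITION & SPEC =====
def Spec_convertir_cadena (cadena : String) (out : String) : Prop := out = convertir_cadena_alt cadena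
instance (cadena : String) (out : String) : Decidable (Spec_convertir_cadena cadena out) := by unfold Spec_convertir_cadena; infer_instance

-- ===== CLAIM (what is proved, stated in full; the proofs are below) =====
def Claim_equal_convertir_cadena : Prop := ∀ (cadena : String), Dom_convertir_cadena cadena → Spec_convertir_cadena cadena (convertir_cadena cadena)

-- ===== LEMMAS AND PROOFS =====

theorem singleton_prefix_iff {α : Type} (a : α) (l : List α) :
    [a] <+: l ↔ l.head? = some a := by
  cases l with
  | nil => simp
  | cons x xs =>
    constructor
    · rintro ⟨t, ht⟩
      simp at ht
      simp [ht.1]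
    · intro h
      simp at h
      exact ⟨xs, by simp [h]⟩

theorem singleton_infix_iff {α : Type} (a : α) (l : List α) :
    [a] <:+: l ↔ a ∈ l := by
  constructor
  · intro h
    have := h.sublist
    simpa using this
  · intro h
    obtain ⟨s, t, rfl⟩ := List.append_of_mem h
    exact ⟨s, t, by simp⟩

theorem convLoopA_eq_filter (cad : List Char) :
    convLoopA cad = cad.filter (fun ch => ch != ' ') := by
  fun_induction convLoopA cad with
  | case1 cad posi h =>
    -- no space present: filter keeps everything
    have hno : ¬ ([' '] <:+: cad) := (PySem.Chars.find_eq_neg_one_iff cad [' ']).mp h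
    rw [singleton_infix_iff] at hno
    rw [List.filter_eq_self.mpr]
    intro x hx
    simp only [bne_iff_ne, ne_eq]
    intro hxe; exact hno (hxe ▸ hx)
  | case2 cad posi h ih =>
    have hnn : 0 ≤ posi := by
      have := PySem.Chars.neg_one_le_find cad [' ']
      simp only [posi] at *
      omega
    have hspec := PySem.Chars.find_spec hnn
    set i := posi.toNat with hi
    -- cad.drop i starts with ' '
    have hdrop : cad.drop i = ' ' :: cad.drop (i + 1) := by
      obtain ⟨t, ht⟩ := hspec.1
      have htail : cad.drop (i + 1) = (cad.drop i).drop 1 := by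
        rw [List.drop_drop]
      rw [htail, ← ht]
      simp
    -- every char before i is not a space
    have htake : ∀ x ∈ cad.take i, x != ' ' := by
      intro x hx
      obtain ⟨j, hj, hget⟩ := List.getElem_of_mem hx
      have hjlen : j < cad.length := lt_of_lt_of_le hj (by simp)
      have hji : j < i := by simp at hj; exact hj.1
      have hne := hspec.2 j hji
      rw [singleton_prefix_iff, List.head?_drop] at hne
      rw [List.getElem_take] at hget
      simp only [bne_iff_ne, ne_eq]
      intro hxe
      exact hne (by rw [List.getElem?_eq_getElem hjlen, hget, hxe])
    rw [ih]
    rw [PySem.List.slice_to, PySem.List.slice_from]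
    · have h1 : (posi + 1).toNat = i + 1 := by omega
      rw [h1, List.filter_append]
      conv_rhs => rw [← List.take_append_drop i cad, List.filter_append, hdrop]
      have hft : (cad.take i).filter (fun ch => ch != ' ') = cad.take i :=
        List.filter_eq_self.mpr htake
      simp [hft]
      simpa [← hi] using hft
    · omega
    · omega

-- ===== VERDICT (by name: the statement is the Claim_ definition above) =====
theorem convertir_cadena_spec : Claim_equal_convertir_cadena := by
  intro cadena _
  unfold Spec_convertir_cadena convertir_cadena convertir_cadena_alt
  rw [convLoopA_eq_filter]
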